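-- pv_equiv track=rewrite | github.com/Platfo-net/platfo-backend-api | app/core/telegram/helpers.py | number_to_price
-- ===== SOURCE A (Python) =====
-- def number_to_price(number):
--     number = list(reversed(list(str(number))))
--     i = 0
--     new_number = []
--     for char in number:
--         i += 1
--         new_number.append(char)
--         if i % 3 == 0 and i != len(number):
--             new_number.append(",")
--     new_number = reversed(new_number)
--     return "".join(new_number)
-- ===== SOURCE B (Python) =====
-- def number_to_price(number):
--     s = str(number)
--     groups = []
--     while s:
--         groups.append(s[-3:])
--         s = s[:-3]
--     return ",".join(reversed(groups))
-- ===== Notes on version B (the rewrite author's own statement) =====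
-- stated objective: simpler
-- what changed: B slices the string into right-aligned three-character chunks and joins them with commas, instead of reversing the character list and walking it with a modulo-three counter that decides comma insertion.
import Mathlib
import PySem

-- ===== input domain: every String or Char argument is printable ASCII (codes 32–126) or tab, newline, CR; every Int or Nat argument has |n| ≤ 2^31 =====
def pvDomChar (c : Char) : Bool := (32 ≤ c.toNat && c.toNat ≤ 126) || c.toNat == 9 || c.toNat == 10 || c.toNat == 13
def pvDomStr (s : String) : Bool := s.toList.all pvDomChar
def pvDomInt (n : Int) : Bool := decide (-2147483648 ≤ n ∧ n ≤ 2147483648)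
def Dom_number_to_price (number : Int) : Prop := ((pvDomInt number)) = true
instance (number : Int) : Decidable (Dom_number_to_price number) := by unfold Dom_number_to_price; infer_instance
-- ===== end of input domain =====

-- B chops the string into right-aligned 3-char chunks and joins with commas, instead of A's
-- reversed walk with a modulo-3 counter; objective: simpler decomposition, same exact output.

-- ===== PORT A =====
def number_to_price (number : Int) : String :=
  let numberL : List Char := (PySem.Int.toStr number).toList.reverse
  let fin := numberL.foldl (fun (st : Nat × List Char) ch =>
      let i := st.1 + 1
      let nn := st.2 ++ [ch]
      let nn := if i % 3 = 0 ∧ i ≠ numberL.length then nn ++ [','] else nn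
      (i, nn)) (0, [])
  String.mk fin.2.reverse

-- ===== PORT B =====
-- s[-3:] on a list of length L is `drop (L-3)` and s[:-3] is `take (L-3)` (Nat subtraction
-- clamps at 0 exactly as Python's negative-slice clamping does here) — exact transliteration.
def chopGroups (s : List Char) : List (List Char) :=
  if h : s = [] then []
  else (s.drop (s.length - 3)) :: chopGroups (s.take (s.length - 3))
termination_by s.length
decreasing_by
  have hs : 0 < s.length := List.length_pos_of_ne_nil h
  simp only [List.length_take]
  omega

-- ",".join(reversed(groups)), with Python strings carried as their character lists
def number_to_price_alt (number : Int) : String :=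
  let s : List Char := (PySem.Int.toStr number).toList
  String.mk (List.intercalate [','] (chopGroups s).reverse)

-- ===== PRECONDITION & SPEC =====
def Spec_number_to_price (number : Int) (out : String) : Prop := out = number_to_price_alt number
instance (number : Int) (out : String) : Decidable (Spec_number_to_price number out) := by unfold Spec_number_to_price; infer_instance

-- ===== CLAIM (what is proved, stated in full; the proofs are below) =====
def Claim_equal_number_to_price : Prop := ∀ (number : Int), Dom_number_to_price number → Spec_number_to_price number (number_to_price number)

-- ===== LEMMAS AND PROOFS =====

-- chunks of three from the front of the reversed string
def frontChunks : List Char → List (List Char)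
  | [] => []
  | [a] => [[a]]
  | [a, b] => [[a, b]]
  | a :: b :: c :: rest => [a, b, c] :: frontChunks rest

-- per-character description of A's comma insertion
def withCommas (n : Nat) (k : Nat) : List Char → List Char
  | [] => []
  | c :: rest =>
      c :: (if (k+1) % 3 = 0 ∧ (k+1) ≠ n then ',' :: withCommas n (k+1) rest
            else withCommas n (k+1) rest)

lemma foldA_eq (n : Nat) : ∀ (r : List Char) (k : Nat) (acc : List Char),
    (r.foldl (fun (st : Nat × List Char) ch =>
      let i := st.1 + 1
      let nn := st.2 ++ [ch]
      let nn := if i % 3 = 0 ∧ i ≠ n then nn ++ [','] else nn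
      (i, nn)) (k, acc)).2 = acc ++ withCommas n k r := by
  intro r
  induction r with
  | nil => intro k acc; simp [withCommas]
  | cons c rest ih =>
      intro k acc
      simp only [List.foldl_cons, withCommas]
      by_cases h : (k+1) % 3 = 0 ∧ (k+1) ≠ n
      · rw [if_pos h, if_pos h, ih]; simp
      · rw [if_neg h, if_neg h, ih]; simp

lemma frontChunks_ne_nil {r : List Char} (h : r ≠ []) : frontChunks r ≠ [] := by
  match r with
  | [a] => simp [frontChunks]
  | [a, b] => simp [frontChunks]
  | a :: b :: c :: rest => simp [frontChunks]

lemma intercalate_cons_of_ne {α : Type} (s : List α) (x : List α) {C : List (List α)}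
    (h : C ≠ []) : List.intercalate s (x :: C) = x ++ s ++ List.intercalate s C := by
  match C with
  | y :: C' => simp [List.intercalate, List.intersperse]

lemma withCommas_eq : ∀ (r : List Char) (k : Nat), k % 3 = 0 →
    withCommas (k + r.length) k r = List.intercalate [','] (frontChunks r) := by
  intro r
  induction r using frontChunks.induct with
  | case1 => intro k _; simp [withCommas, frontChunks, List.intercalate]
  | case2 a =>
      intro k hk
      simp [withCommas, frontChunks, List.intercalate, List.intersperse]
  | case3 a b =>
      intro k hk
      have h1 : (k+1) % 3 = 1 := by omega
      have h2 : (k+2) % 3 = 2 := by omega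
      simp [withCommas, frontChunks, List.intercalate, List.intersperse, h1, h2]
  | case4 a b c rest ih =>
      intro k hk
      have h1 : (k+1) % 3 = 1 := by omega
      have h2 : (k+2) % 3 = 2 := by omega
      have h3 : (k+3) % 3 = 0 := by omega
      by_cases hr : rest = []
      · subst hr
        simp [withCommas, frontChunks, List.intercalate, List.intersperse, h1, h2, h3]
      · have hlen : rest.length ≠ 0 := by simpa using hr
        have hne : (k+3) ≠ (k + (rest.length + 1 + 1 + 1)) := by omega
        have ihr := ih (k+3) h3
        rw [frontChunks, intercalate_cons_of_ne [','] [a,b,c] (frontChunks_ne_nil hr)]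
        simp only [withCommas, List.length_cons, h1, h2]
        have : (k + (rest.length + 1 + 1 + 1)) = (k+3) + rest.length := by omega
        rw [this]
        simp only [h3, hne, ihr, List.cons_append, List.nil_append]
        simp [hr]

lemma chopGroups_eq (s : List Char) : chopGroups s =
    (if s = [] then [] else (s.drop (s.length - 3)) :: chopGroups (s.take (s.length - 3))) := by
  rw [chopGroups]
  split <;> rfl

lemma chopGroups_reverse : ∀ (r : List Char),
    chopGroups r.reverse = (frontChunks r).map List.reverse := by
  intro r
  induction r using frontChunks.induct with
  | case1 => simp [chopGroups_eq, frontChunks]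
  | case2 a => simp [chopGroups_eq, frontChunks]
  | case3 a b =>
      rw [chopGroups_eq]
      simp only [List.reverse_cons]
      rw [chopGroups_eq]
      simp [frontChunks]
  | case4 a b c rest ih =>
      have hrev : (a :: b :: c :: rest).reverse = rest.reverse ++ [c, b, a] := by simp
      rw [hrev, chopGroups_eq]
      have hL : (rest.reverse ++ [c, b, a]).length - 3 = rest.length := by simp
      have hd : (rest.reverse ++ [c, b, a]).drop rest.length = [c, b, a] := by
        rw [List.drop_append_of_le_length (by simp)]; simp
      have ht : (rest.reverse ++ [c, b, a]).take rest.length = rest.reverse := by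
        rw [List.take_append_of_le_length (by simp)]; simp
      simp only [hL, hd, ht, ih, frontChunks, List.map_cons]
      simp

lemma intercalate_append_single {α : Type} (s g : List α) : ∀ (C : List (List α)), C ≠ [] →
    List.intercalate s (C ++ [g]) = List.intercalate s C ++ s ++ g := by
  intro C
  induction C with
  | nil => intro h; exact absurd rfl h
  | cons x C' ih =>
      intro _
      by_cases hC : C' = []
      · subst hC; simp [List.intercalate, List.intersperse]
      · rw [List.cons_append, intercalate_cons_of_ne s x (by simp),
            intercalate_cons_of_ne s x hC, ih hC]
        simp

lemma reverse_intercalate_comma : ∀ (C : List (List Char)),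
    (List.intercalate [','] C).reverse = List.intercalate [','] ((C.map List.reverse).reverse) := by
  intro C
  induction C with
  | nil => simp [List.intercalate]
  | cons x C' ih =>
      by_cases hC : C' = []
      · subst hC; simp [List.intercalate, List.intersperse]
      · rw [intercalate_cons_of_ne [','] x hC]
        have hmap : (((x :: C').map List.reverse).reverse)
            = ((C'.map List.reverse).reverse) ++ [x.reverse] := by simp
        rw [hmap, intercalate_append_single [','] x.reverse ((C'.map List.reverse).reverse)
              (by simp [hC]), ← ih]
        simp

-- ===== VERDICT (by name: the statement is the Claim_ definition above) =====
theorem number_to_price_spec : Claim_equal_number_to_price := by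
  intro number _
  unfold Spec_number_to_price number_to_price number_to_price_alt
  set l : List Char := (PySem.Int.toStr number).toList with hl
  simp only
  rw [foldA_eq l.reverse.length l.reverse 0 []]
  have h0 : (0 : Nat) % 3 = 0 := rfl
  have hmain := withCommas_eq l.reverse 0 h0
  simp only [Nat.zero_add] at hmain
  rw [List.nil_append, hmain, reverse_intercalate_comma]
  have : chopGroups l = (frontChunks l.reverse).map List.reverse := by
    have := chopGroups_reverse l.reverse
    simpa using this
  rw [this]
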